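-- pv_equiv track=rewrite | github.com/HackersUOP/competitive-programming-sessions-2024 | Session_01/Secret_Code_of_the_Cryptic_Circle/solution.py | helper
-- ===== SOURCE A (Python) =====
-- def helper(str, enc):
--     m, n = len(str), len(enc)
--     i = j = x = 0
--     while i < m and j < n:
--         if enc[j].isdigit():
--             if enc[j] == "0" and x == 0:
--                 return False
--             x = x * 10 + int(enc[j])
--         else:
--             i += x
--             x = 0
--             if i >= m or str[i] != enc[j]:
--                 return False
--             i += 1
--         j += 1
--     return i + x == m and j == n
-- ===== SOURCE B (Python) =====
-- def helper(str, enc):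
--     # Phase 1: tokenize enc into number-runs (as whole strings) and single literals.
--     tokens = []
--     k, n = 0, len(enc)
--     while k < n:
--         if enc[k].isdigit():
--             start = k
--             while k < n and enc[k].isdigit():
--                 k += 1
--             tokens.append(enc[start:k])
--         else:
--             tokens.append(enc[k])
--             k += 1
--     # Phase 2: walk tokens with position i and pending skip x.
--     m = len(str)
--     i = x = 0
--     for tok in tokens:
--         if i >= m:
--             return False
--         if tok[0].isdigit():
--             if tok[0] == '0':
--                 return False
--             x = int(tok)
--         else:
--             i += x
--             x = 0
--             if i >= m or str[i] != tok:
--                 return False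
--             i += 1
--     return i + x == m
-- ===== Notes on version B (the rewrite author's own statement) =====
-- stated objective: alternative
-- what changed: A is a single char-by-char state machine over enc interleaving digit accumulation with matching; B first tokenizes enc into number-runs and literal tokens, then matches str against the token list, converting each number token at once with int().
import Mathlib
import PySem

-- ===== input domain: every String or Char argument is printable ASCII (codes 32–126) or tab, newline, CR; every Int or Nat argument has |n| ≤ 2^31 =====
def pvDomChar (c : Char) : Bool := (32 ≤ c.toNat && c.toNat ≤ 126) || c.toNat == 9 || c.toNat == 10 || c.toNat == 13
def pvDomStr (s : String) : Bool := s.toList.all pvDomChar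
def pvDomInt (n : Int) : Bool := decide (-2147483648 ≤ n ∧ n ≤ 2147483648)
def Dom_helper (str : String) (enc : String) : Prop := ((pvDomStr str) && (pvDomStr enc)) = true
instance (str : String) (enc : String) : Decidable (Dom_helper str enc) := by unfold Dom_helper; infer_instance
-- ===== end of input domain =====

-- B restates A's one-pass char machine as tokenize-then-match (two phases); objective: alternative decomposition, same cost.

-- ===== PORT A =====
-- A's while loop: j advances every iteration, so recursion over the remaining enc chars,
-- carrying i (position in str) and x (pending number). '[] ' case = loop exit with j = n;
-- 'i < m' false with chars left = loop exit with j < n, so the final 'j == n' test is false.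
def helperLoopA (s : List Char) (m i x : Nat) (e : List Char) : Bool :=
  match e with
  | [] => decide (i + x = m)
  | c :: rest =>
    if i < m then
      if c.isDigit then
        if c = '0' ∧ x = 0 then false
        else helperLoopA s m i (x * 10 + (c.toNat - 48)) rest
      else
        if m ≤ i + x then false
        else if s.getD (i + x) ' ' ≠ c then false   -- str[i]: in range here (i+x < m)
        else helperLoopA s m (i + x + 1) 0 rest
    else false

def helper (str : String) (enc : String) : Bool :=
  helperLoopA str.toList str.toList.length 0 0 enc.toList

-- ===== PORT B =====
-- Phase 1 of Source B: group consecutive digits into one token, each non-digit a singleton token.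
def tokenizeB (e : List Char) : List (List Char) :=
  match e with
  | [] => []
  | c :: rest =>
    if c.isDigit then
      (c :: rest.takeWhile Char.isDigit) :: tokenizeB (rest.dropWhile Char.isDigit)
    else [c] :: tokenizeB rest
termination_by e.length
decreasing_by
  · have := List.length_dropWhile_le (p := Char.isDigit) (l := rest); simp; omega
  · simp

-- int(tok) for a digit token
def natOfDigitsB (t : List Char) : Nat := t.foldl (fun a c => a * 10 + (c.toNat - 48)) 0

-- Phase 2 of Source B: walk the tokens with position i and pending skip x.
def runToksB (s : List Char) (m i x : Nat) (ts : List (List Char)) : Bool :=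
  match ts with
  | [] => decide (i + x = m)
  | t :: ts' =>
    if m ≤ i then false
    else
      match t with
      | [] => false   -- unreachable: tokens are nonempty
      | c :: _ =>
        if c.isDigit then
          if c = '0' then false
          else runToksB s m i (natOfDigitsB t) ts'
        else
          if m ≤ i + x then false
          else if s.getD (i + x) ' ' ≠ c then false
          else runToksB s m (i + x + 1) 0 ts'

def helper_alt (str : String) (enc : String) : Bool :=
  runToksB str.toList str.toList.length 0 0 (tokenizeB enc.toList)

-- ===== PRECONDITION & SPEC =====
def Spec_helper (str : String) (enc : String) (out : Bool) : Prop := out = helper_alt str enc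
instance (str : String) (enc : String) (out : Bool) : Decidable (Spec_helper str enc out) := by unfold Spec_helper; infer_instance

-- ===== CLAIM (what is proved, stated in full; the proofs are below) =====
def Claim_equal_helper : Prop := ∀ (str : String) (enc : String), Dom_helper str enc → Spec_helper str enc (helper str enc)

-- ===== LEMMAS AND PROOFS =====

-- the head of the remaining enc (if any) is not a digit
def headND : List Char → Prop
  | [] => True
  | c :: _ => c.isDigit = false

theorem headND_dropWhile (l : List Char) : headND (l.dropWhile Char.isDigit) := by
  induction l with
  | nil => simp [headND, List.dropWhile]
  | cons c t ih =>
    by_cases h : c.isDigit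
    · simpa [List.dropWhile, h] using ih
    · simp [List.dropWhile, h, headND]

-- A consumes a digit run one char at a time, folding it into x; with x ≠ 0 the
-- leading-zero branch never fires.
theorem runRed (s : List Char) (m : Nat) :
    ∀ (run rest : List Char) (i x : Nat),
      (∀ d ∈ run, d.isDigit = true) → i < m → x ≠ 0 →
      helperLoopA s m i x (run ++ rest) =
        helperLoopA s m i (run.foldl (fun a c => a * 10 + (c.toNat - 48)) x) rest := by
  intro run
  induction run with
  | nil => intro rest i x _ _ _; simp
  | cons d ds ih =>
    intro rest i x hall hi hx
    have hd : d.isDigit = true := hall d (by simp)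
    have h0 : ¬ (d = '0' ∧ x = 0) := by rintro ⟨_, h⟩; exact hx h
    have hx' : x * 10 + (d.toNat - 48) ≠ 0 := by
      rcases Nat.exists_eq_succ_of_ne_zero hx with ⟨k, rfl⟩; omega
    simp only [List.cons_append, helperLoopA, if_pos hi, hd, if_pos, if_neg h0, List.foldl]
    exact ih rest i _ (fun d hmem => hall d (by simp [hmem])) hi hx'

theorem digit_toNat {c : Char} (h : c.isDigit = true) : 48 ≤ c.toNat ∧ c.toNat ≤ 57 := by
  simp only [Char.isDigit, Bool.and_eq_true, decide_eq_true_eq] at h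
  obtain ⟨h1, h2⟩ := h
  exact ⟨h1, h2⟩

theorem ne_zero_toNat {c : Char} (h : ¬ c = '0') : c.toNat ≠ 48 := by
  intro he
  exact h (Char.ext (by
    have : c.toNat = ('0' : Char).toNat := he
    exact (UInt32.toNat_inj).mp this))

-- main correspondence: A's char machine equals B's token walk, provided x = 0
-- whenever the next enc char is a digit (the only reachable states)
theorem mainL (s : List Char) (m : Nat) :
    ∀ (N : Nat) (e : List Char), e.length ≤ N → ∀ i x, (x = 0 ∨ headND e) →
      helperLoopA s m i x e = runToksB s m i x (tokenizeB e) := by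
  intro N
  induction N with
  | zero =>
    intro e he i x _
    have : e = [] := List.eq_nil_of_length_eq_zero (Nat.le_zero.mp he)
    subst this
    simp [helperLoopA, runToksB, tokenizeB]
  | succ N ih =>
    intro e he i x hside
    match e with
    | [] => simp [helperLoopA, runToksB, tokenizeB]
    | c :: rest =>
      by_cases hi : i < m
      · by_cases hd : c.isDigit
        · -- digit case: side condition forces x = 0
          have hx0 : x = 0 := by
            rcases hside with h | h
            · exact h
            · simp [headND, hd] at h
          subst hx0
          by_cases h0 : c = '0'
          · simp [helperLoopA, tokenizeB, runToksB, hi, h0, Nat.not_le.mpr hi]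
          · -- A folds the whole digit run; B takes it as one token
            have hsplit : rest = rest.takeWhile Char.isDigit ++ rest.dropWhile Char.isDigit :=
              (List.takeWhile_append_dropWhile (p := Char.isDigit) (l := rest)).symm
            have hall : ∀ d ∈ rest.takeWhile Char.isDigit, d.isDigit = true :=
              fun d hm => List.mem_takeWhile_imp hm
            have hcn : c.toNat - 48 ≠ 0 := by
              have := digit_toNat hd
              have := ne_zero_toNat h0
              omega
            have hlen : (rest.dropWhile Char.isDigit).length ≤ N := by
              have := List.length_dropWhile_le (p := Char.isDigit) (l := rest)
              simp at he; omega
            have hA : helperLoopA s m i (0 * 10 + (c.toNat - 48)) rest =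
                helperLoopA s m i
                  ((rest.takeWhile Char.isDigit).foldl
                    (fun a c => a * 10 + (c.toNat - 48)) (c.toNat - 48))
                  (rest.dropWhile Char.isDigit) := by
              conv_lhs => rw [hsplit]
              simpa using runRed s m (rest.takeWhile Char.isDigit)
                (rest.dropWhile Char.isDigit) i (c.toNat - 48) hall hi hcn
            have hB : natOfDigitsB (c :: rest.takeWhile Char.isDigit) =
                (rest.takeWhile Char.isDigit).foldl
                  (fun a c => a * 10 + (c.toNat - 48)) (c.toNat - 48) := by
              simp [natOfDigitsB, List.foldl]
            have hrec := ih (rest.dropWhile Char.isDigit) hlen i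
              ((rest.takeWhile Char.isDigit).foldl
                (fun a c => a * 10 + (c.toNat - 48)) (c.toNat - 48))
              (Or.inr (headND_dropWhile rest))
            simp only [helperLoopA, tokenizeB, runToksB, if_pos hi, hd, if_pos,
              if_neg (Nat.not_le.mpr hi), if_neg h0, hB]
            simpa [h0] using hA.trans hrec
        · -- literal case: both do the same checks, recurse with x = 0
          have hlen : rest.length ≤ N := by simp at he; omega
          have hrec := ih rest hlen (i + x + 1) 0 (Or.inl rfl)
          by_cases hm : m ≤ i + x
          · simp [helperLoopA, tokenizeB, runToksB, hi, hd, hm, Nat.not_le.mpr hi]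
          · simp only [helperLoopA, tokenizeB, if_pos hi, hd, hrec]
            simp [runToksB, Nat.not_le.mpr hi, hm, hd]
      · -- i ≥ m with enc left: A returns false; B's first token hits the i ≥ m check
        have him : m ≤ i := Nat.not_lt.mp hi
        by_cases hd : c.isDigit <;>
          simp [helperLoopA, tokenizeB, runToksB, hi, hd, him]

-- ===== VERDICT (by name: the statement is the Claim_ definition above) =====
theorem helper_spec : Claim_equal_helper := by
  intro str enc _
  unfold Spec_helper helper helper_alt
  exact mainL str.toList str.toList.length enc.toList.length enc.toList le_rfl 0 0 (Or.inl rfl)
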